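-- pv_equiv track=rewrite | github.com/SeonghoBaek/RePix | post_proc.py | get_now_next_3_coord_and_idxs
-- ===== SOURCE A (Python) =====
-- def get_now_next_3_coord_and_idxs(contour, idx):
--     '''return now_coord, [next1_coord, next2_coord, next3_coord]'''
--     now_coord = contour[idx][0]
--     next3_coord_list = list()
--     next3_coord_idxs = list()
--     while len(next3_coord_list) < 3:
--         if idx + 1 >= len(contour):
--             idx = 0
--         else:
--             idx = idx + 1
--         next3_coord_list.append(contour[idx][0])
--         next3_coord_idxs.append(idx)
--     return now_coord, next3_coord_list, next3_coord_idxs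
-- ===== SOURCE B (Python) =====
-- def get_now_next_3_coord_and_idxs(contour, idx):
--     '''return now_coord, [next1_coord, next2_coord, next3_coord]'''
--     now_coord = contour[idx][0]
--     n = len(contour)
--     next3_coord_idxs = (list(range(idx + 1, n)) + 3 * list(range(n)))[:3]
--     next3_coord_list = [pt[0] for pt in (contour[idx + 1:] + 3 * contour)[:3]]
--     return now_coord, next3_coord_list, next3_coord_idxs
-- ===== Notes on version B (the rewrite author's own statement) =====
-- stated objective: alternative
-- what changed: Replaces A's stateful stepping loop (mutating idx with a conditional reset to 0) by building the whole successor streams up front as list concatenations -- range(idx+1, n) + 3*range(n) for the indices and the slice-rotation contour[idx+1:] + 3*contour for the coordinates -- and taking the first three of each; no per-step wraparound test and no modulo.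
import Mathlib
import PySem

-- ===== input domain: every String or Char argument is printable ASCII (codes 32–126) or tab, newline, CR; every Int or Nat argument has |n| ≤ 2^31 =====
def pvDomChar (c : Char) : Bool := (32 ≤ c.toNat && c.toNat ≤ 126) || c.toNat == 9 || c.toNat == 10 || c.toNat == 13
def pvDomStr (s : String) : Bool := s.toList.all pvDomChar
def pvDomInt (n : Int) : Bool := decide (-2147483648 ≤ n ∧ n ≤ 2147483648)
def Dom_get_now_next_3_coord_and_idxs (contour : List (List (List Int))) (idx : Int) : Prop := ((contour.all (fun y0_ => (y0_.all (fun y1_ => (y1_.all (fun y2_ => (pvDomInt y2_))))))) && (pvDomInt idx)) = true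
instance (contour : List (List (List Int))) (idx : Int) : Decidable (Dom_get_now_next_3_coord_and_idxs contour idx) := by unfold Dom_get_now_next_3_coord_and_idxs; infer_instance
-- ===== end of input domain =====

-- B replaces A's stateful stepping loop (conditional wraparound of a mutated idx) by
-- building the whole successor streams up front — range(idx+1, n) + 3*range(n) for the
-- indices, the slice-rotation contour[idx+1:] + 3*contour for the coordinates — and
-- taking the first three of each; return value proved identical wherever A returns.

-- ===== PORT A =====
-- the while loop: runs until 3 coords collected; each iteration appends exactly one, so fuel 3
def pvALoop (contour : List (List (List Int))) : Nat → Int → List (List Int) → List Int → List (List Int) × List Int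
  | 0, _, cl, il => (cl, il)
  | m+1, idx, cl, il =>
      let idx' := if idx + 1 ≥ PySem.List.len contour then 0 else idx + 1
      pvALoop contour m idx' (cl ++ [PySem.List.pyGetD (PySem.List.pyGetD contour idx' []) 0 []]) (il ++ [idx'])

def get_now_next_3_coord_and_idxs (contour : List (List (List Int))) (idx : Int) : List Int × List (List Int) × List Int :=
  let now_coord := PySem.List.pyGetD (PySem.List.pyGetD contour idx []) 0 []   -- contour[idx][0]; Pre_ guarantees in range
  let r := pvALoop contour 3 idx [] []
  (now_coord, r.1, r.2)

-- ===== PORT B =====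
def get_now_next_3_coord_and_idxs_alt (contour : List (List (List Int))) (idx : Int) : List Int × List (List Int) × List Int :=
  let now_coord := PySem.List.pyGetD (PySem.List.pyGetD contour idx []) 0 []   -- contour[idx][0]; Pre_ guarantees in range
  let n := PySem.List.len contour
  -- (list(range(idx+1, n)) + 3*list(range(n)))[:3]
  let next3_coord_idxs := (PySem.List.pyRange (idx + 1) n 1 ++
      (PySem.List.pyRange 0 n 1 ++ PySem.List.pyRange 0 n 1 ++ PySem.List.pyRange 0 n 1)).take 3
  -- [pt[0] for pt in (contour[idx+1:] + 3*contour)[:3]]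
  let next3_coord_list := ((PySem.List.slice contour (some (idx + 1)) none ++
      (contour ++ contour ++ contour)).take 3).map (fun pt => PySem.List.pyGetD pt 0 [])
  (now_coord, next3_coord_list, next3_coord_idxs)

-- ===== PRECONDITION & SPEC =====
-- Pre_ is exactly where the Python A returns: idx in Python range of contour (else IndexError
-- at contour[idx]) and the inner list at each accessed position — idx and its three cyclic
-- successors, written via Python mod as their canonical positions — nonempty (else IndexError at [0]).
def Pre_get_now_next_3_coord_and_idxs (contour : List (List (List Int))) (idx : Int) : Prop :=
  -(PySem.List.len contour) ≤ idx ∧ idx < PySem.List.len contour ∧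
  ∀ k ∈ ([0, 1, 2, 3] : List Int),
    PySem.List.pyGetD contour (PySem.Int.mod (idx + k) (PySem.List.len contour)) [] ≠ []
instance (contour : List (List (List Int))) (idx : Int) : Decidable (Pre_get_now_next_3_coord_and_idxs contour idx) := by unfold Pre_get_now_next_3_coord_and_idxs; infer_instance

def pvWitness_get_now_next_3_coord_and_idxs : List (List (List Int)) × Int := ([[[0, 1]], [[2, 3]]], 0)

def Spec_get_now_next_3_coord_and_idxs (contour : List (List (List Int))) (idx : Int) (out : List Int × List (List Int) × List Int) : Prop := out = get_now_next_3_coord_and_idxs_alt contour idx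
instance (contour : List (List (List Int))) (idx : Int) (out : List Int × List (List Int) × List Int) : Decidable (Spec_get_now_next_3_coord_and_idxs contour idx out) := by unfold Spec_get_now_next_3_coord_and_idxs; infer_instance

-- ===== CLAIM (what is proved, stated in full; the proofs are below) =====
def Claim_equal_get_now_next_3_coord_and_idxs : Prop := ∀ (contour : List (List (List Int))) (idx : Int), Dom_get_now_next_3_coord_and_idxs contour idx → Pre_get_now_next_3_coord_and_idxs contour idx → Spec_get_now_next_3_coord_and_idxs contour idx (get_now_next_3_coord_and_idxs contour idx)

-- ===== LEMMAS AND PROOFS =====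

def pvStep (n i : Int) : Int := if i + 1 ≥ n then 0 else i + 1

def pvF (n : Int) : Nat → Int → List Int
  | 0, _ => []
  | m+1, i => pvStep n i :: pvF n m (pvStep n i)

def pvCopies {α : Type} (xs : List α) : Nat → List α
  | 0 => []
  | m+1 => xs ++ pvCopies xs m

theorem pvCopies_snoc {α : Type} (xs : List α) (m : Nat) :
    pvCopies xs (m+1) = pvCopies xs m ++ xs := by
  induction m with
  | zero => simp [pvCopies]
  | succ k ih => simp [pvCopies, List.append_assoc] at ih ⊢; rw [ih]

theorem pvCopies_length {α : Type} (xs : List α) (m : Nat) :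
    (pvCopies xs m).length = m * xs.length := by
  induction m with
  | zero => simp [pvCopies]
  | succ k ih => simp [pvCopies, ih]; ring

theorem pyGetD_neg_int {α : Type} (xs : List α) (i : Int) (d : α)
    (h0 : i < 0) (h1 : -(xs.length : Int) ≤ i) :
    PySem.List.pyGetD xs i d = xs.getD ((xs.length : Int) + i).toNat d := by
  have hk : i = -(((-i).toNat : Nat) : Int) := by omega
  rw [hk, PySem.List.pyGetD_neg_natCast xs (-i).toNat d (by omega) (by omega),
    List.getD_eq_getElem xs d (show ((xs.length : Int) + -(((-i).toNat : Nat) : Int)).toNat < xs.length by omega)]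
  simp only [show xs.length - (-i).toNat = ((xs.length : Int) + -(((-i).toNat : Nat) : Int)).toNat from by omega]

theorem pvCoords_stream (contour : List (List (List Int))) (m : Nat) :
    ∀ (i : Int), -(contour.length : Int) ≤ i → i < (contour.length : Int) →
    (PySem.List.slice contour (some (i+1)) none ++ pvCopies contour m).take m
      = (pvF (contour.length : Int) m i).map (fun j => PySem.List.pyGetD contour j []) := by
  induction m with
  | zero => intro i _ _; simp [pvF]
  | succ k ih =>
      intro i hlo hhi
      by_cases h : i + 1 < (contour.length : Int)
      · have hs : pvStep (contour.length : Int) i = i + 1 := by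
          unfold pvStep; rw [if_neg (by omega)]
        rw [pvF, hs, List.map_cons]
        by_cases h0 : 0 ≤ i + 1
        · rw [PySem.List.slice_from contour h0]
          have ht : (i+1).toNat < contour.length := by omega
          rw [List.drop_eq_getElem_cons ht]
          simp only [List.cons_append, List.take_succ_cons]
          rw [PySem.List.pyGetD_eq_getElem contour [] h0 (by omega)]
          congr 1
          -- tail
          rw [show (i+1).toNat + 1 = (i+2).toNat from by omega,
            ← PySem.List.slice_from contour (show (0:Int) ≤ i + 2 by omega),
            pvCopies_snoc, ← List.append_assoc,
            List.take_append_of_le_length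
              (by simp [pvCopies_length]; nlinarith [show 1 ≤ contour.length from by omega])]
          have := ih (i+1) (by omega) h
          rw [show i + 1 + 1 = i + 2 from by ring] at this
          exact this
        · -- i+1 < 0
          rw [PySem.List.slice_some_none]
          have hcl : PySem.List.clampIdx contour.length (i+1) = ((contour.length : Int) + (i+1)).toNat := by
            unfold PySem.List.clampIdx
            rw [if_pos (by omega), if_neg (by omega)]
          rw [hcl]
          have ht : ((contour.length : Int) + (i+1)).toNat < contour.length := by omega
          rw [List.drop_eq_getElem_cons ht]
          simp only [List.cons_append, List.take_succ_cons]
          rw [pyGetD_neg_int contour (i+1) [] (by omega) (by omega),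
            List.getD_eq_getElem contour [] ht]
          congr 1
          -- tail
          by_cases h2 : i + 2 < 0
          · rw [show ((contour.length : Int) + (i+1)).toNat + 1 = PySem.List.clampIdx contour.length (i+2) from by
              unfold PySem.List.clampIdx; rw [if_pos (by omega), if_neg (by omega)]; omega]
            rw [← PySem.List.slice_some_none, pvCopies_snoc, ← List.append_assoc,
              List.take_append_of_le_length
                (by simp [pvCopies_length]; nlinarith [show 1 ≤ contour.length from by omega])]
            have := ih (i+1) (by omega) h
            rw [show i + 1 + 1 = i + 2 from by ring] at this
            exact this
          · -- i = -2 : the drop reaches the end; the next slice is the whole list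
            have hi2 : i + 2 = 0 := by omega
            rw [show ((contour.length : Int) + (i+1)).toNat + 1 = contour.length from by omega,
              List.drop_length, List.nil_append]
            have := ih (i+1) (by omega) h
            rw [show i + 1 + 1 = i + 2 from by ring, hi2] at this
            rw [PySem.List.slice_zero_start, PySem.List.slice_none_none] at this
            rw [show pvCopies contour (k+1) = contour ++ pvCopies contour k from rfl]
            exact this
      · -- i + 1 = length : wrap to the first copy
        have hi : i + 1 = (contour.length : Int) := by omega
        have hs : pvStep (contour.length : Int) i = 0 := by
          unfold pvStep; rw [if_pos (by omega)]
        rw [pvF, hs, List.map_cons]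
        rw [hi, PySem.List.slice_from contour (by omega),
          show ((contour.length : Int)).toNat = contour.length from by omega,
          List.drop_length, List.nil_append]
        rw [show pvCopies contour (k+1) = contour ++ pvCopies contour k from rfl]
        have hne : 0 < contour.length := by omega
        have hdecomp : contour = contour[0] :: contour.drop 1 := by
          conv_lhs => rw [← List.drop_zero (l := contour)]
          rw [List.drop_eq_getElem_cons hne]
        rw [show (contour : List (List (List Int))) ++ pvCopies contour k
              = contour[0] :: (contour.drop 1 ++ pvCopies contour k) from by
            rw [← List.cons_append, ← hdecomp]]
        rw [List.take_succ_cons]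
        rw [PySem.List.pyGetD_eq_getElem contour [] le_rfl (by omega)]
        congr 1
        have := ih 0 (by omega) (by omega)
        rw [show (0:Int) + 1 = 1 from rfl,
          PySem.List.slice_from contour (show (0:Int) ≤ 1 by omega)] at this
        simp only [Int.toNat_one] at this
        exact this

-- B's index stream: the first m of range(i+1, n) + m copies of range(n) are A's indices
theorem pvIdxs_stream (n : Int) (hn : 1 ≤ n) (m : Nat) :
    ∀ (i : Int), -n ≤ i → i < n →
    (PySem.List.pyRange (i+1) n 1 ++ pvCopies (PySem.List.pyRange 0 n 1) m).take m
      = pvF n m i := by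
  induction m with
  | zero => intro i _ _; simp [pvF]
  | succ k ih =>
      intro i hlo hhi
      by_cases h : i + 1 < n
      · rw [PySem.List.pyRange_one_cons h]
        simp only [List.cons_append, List.take_succ_cons]
        rw [pvF]
        have hs : pvStep n i = i + 1 := by unfold pvStep; rw [if_neg (by omega)]
        rw [hs, pvCopies_snoc, ← List.append_assoc,
          List.take_append_of_le_length
            (by simp [pvCopies_length, PySem.List.length_pyRange_one]
                nlinarith [show 1 ≤ n.toNat from by omega])]
        have := ih (i+1) (by omega) h
        rw [show i + 1 + 1 = i + 2 from by ring] at this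
        rw [show i + 1 + 1 = i + 2 from by ring]
        rw [this]
      · have hi : i + 1 = n := by omega
        rw [hi, PySem.List.pyRange_one_eq_nil le_rfl, List.nil_append]
        have hR : PySem.List.pyRange 0 n 1 ++ pvCopies (PySem.List.pyRange 0 n 1) k
              = 0 :: (PySem.List.pyRange 1 n 1 ++ pvCopies (PySem.List.pyRange 0 n 1) k) := by
          rw [← List.cons_append]
          congr 1
          rw [PySem.List.pyRange_one_cons (show (0:Int) < n by omega)]
          norm_num
        rw [show pvCopies (PySem.List.pyRange 0 n 1) (k+1)
              = PySem.List.pyRange 0 n 1 ++ pvCopies (PySem.List.pyRange 0 n 1) k from rfl]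
        rw [hR, List.take_succ_cons, pvF]
        have hs : pvStep n i = 0 := by unfold pvStep; rw [if_pos (by omega)]
        rw [hs]
        have := ih 0 (by omega) (by omega)
        rw [show (0:Int) + 1 = 1 from by norm_num] at this
        rw [this]

-- A's loop in terms of pvF
theorem pvALoop_eq (contour : List (List (List Int))) (m : Nat) :
    ∀ (i : Int) (cl : List (List Int)) (il : List Int),
    pvALoop contour m i cl il =
      (cl ++ (pvF (PySem.List.len contour) m i).map
          (fun j => PySem.List.pyGetD (PySem.List.pyGetD contour j []) 0 []),
       il ++ pvF (PySem.List.len contour) m i) := by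
  induction m with
  | zero => intro i cl il; simp [pvALoop, pvF]
  | succ k ih =>
      intro i cl il
      rw [pvALoop, ih]
      simp [pvF, pvStep, List.append_assoc]

-- ===== VERDICT (by name: the statement is the Claim_ definition above) =====
theorem get_now_next_3_coord_and_idxs_spec : Claim_equal_get_now_next_3_coord_and_idxs := by
  intro contour idx _ hpre
  obtain ⟨hlo, hhi, -⟩ := hpre
  unfold Spec_get_now_next_3_coord_and_idxs
  have hlen : PySem.List.len contour = (contour.length : Int) := by
    simp [PySem.List.len_eq]
  rw [hlen] at hlo hhi
  have hn : 1 ≤ (contour.length : Int) := by omega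
  have hidxs := pvIdxs_stream (contour.length : Int) hn 3 idx hlo hhi
  have hcoords := pvCoords_stream contour 3 idx hlo hhi
  rw [show pvCopies (PySem.List.pyRange 0 (contour.length : Int) 1) 3
        = PySem.List.pyRange 0 (contour.length : Int) 1 ++ PySem.List.pyRange 0 (contour.length : Int) 1
          ++ PySem.List.pyRange 0 (contour.length : Int) 1 from by
      simp [pvCopies, List.append_assoc]] at hidxs
  rw [show pvCopies contour 3 = contour ++ contour ++ contour from by
      simp [pvCopies, List.append_assoc]] at hcoords
  simp only [get_now_next_3_coord_and_idxs, get_now_next_3_coord_and_idxs_alt]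
  rw [pvALoop_eq, hlen, List.nil_append, List.nil_append]
  refine congrArg₂ Prod.mk rfl (congrArg₂ Prod.mk ?_ ?_)
  · rw [hcoords, List.map_map]
    rfl
  · rw [hidxs]
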